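-- pv_equiv track=rewrite | github.com/Oscarvch03/Proyecto_Logica_2 | Tablero5x5/algoritmos.py | formaClausal
-- ===== SOURCE A (Python) =====
-- def formaClausal(A):
--     out = []
--     aux = []
--     for i in A:
--         if(i == "Y"):
--             out.append(aux)
--             aux = []
--         elif(i != "(" and i != ")" and i != "O"):
--             aux.append(i)
--         else:
--             continue
--     return out
-- ===== SOURCE B (Python) =====
-- def formaClausal(A):
--     toks = [x for x in A if x not in ("(", ")", "O")]
--     out = []
--     while "Y" in toks:
--         k = toks.index("Y")
--         out.append(toks[:k])
--         del toks[:k + 1]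
--     return out
-- ===== Notes on version B (the rewrite author's own statement) =====
-- stated objective: alternative
-- what changed: Replaced A's single stateful accumulate-and-flush scan (out/aux with three branches) by a two-phase pipeline: first filter out '(', ')', 'O', then repeatedly split the filtered token list at the first 'Y' via index/slicing, discarding the trailing segment.
import Mathlib
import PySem

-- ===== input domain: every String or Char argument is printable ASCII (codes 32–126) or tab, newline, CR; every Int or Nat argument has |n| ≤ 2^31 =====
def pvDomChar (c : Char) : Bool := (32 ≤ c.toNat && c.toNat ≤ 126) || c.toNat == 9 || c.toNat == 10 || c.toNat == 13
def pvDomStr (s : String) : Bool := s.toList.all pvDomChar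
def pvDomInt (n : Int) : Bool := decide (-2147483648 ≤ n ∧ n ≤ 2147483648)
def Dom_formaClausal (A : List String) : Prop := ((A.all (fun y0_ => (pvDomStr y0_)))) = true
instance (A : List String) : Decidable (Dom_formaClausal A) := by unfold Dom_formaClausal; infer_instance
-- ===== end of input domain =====

-- B replaces A's stateful accumulate-and-flush scan by filter-then-split-at-'Y'; objective: alternative decomposition, same cost.

-- ===== PORT A =====
-- the for-loop of A, carrying the state (out, aux)
def fcLoopA : List String → List (List String) → List String → List (List String)
  | [], out, _aux => out
  | i :: rest, out, aux =>
    if i = "Y" then fcLoopA rest (out ++ [aux]) []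
    else if i ≠ "(" ∧ i ≠ ")" ∧ i ≠ "O" then fcLoopA rest out (aux ++ [i])
    else fcLoopA rest out aux

def formaClausal (A : List String) : List (List String) := fcLoopA A [] []

-- ===== PORT B =====
-- the while-loop of B: while "Y" in toks, cut off the prefix before the first "Y"
def fcSplitY (toks : List String) : List (List String) :=
  if h : "Y" ∈ toks then
    let k := toks.idxOf "Y"
    toks.take k :: fcSplitY (toks.drop (k + 1))
  else []
termination_by toks.length
decreasing_by
  simp only [List.length_drop]
  have : toks ≠ [] := List.ne_nil_of_mem h
  have : 0 < toks.length := List.length_pos_iff.mpr this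
  omega

def formaClausal_alt (A : List String) : List (List String) :=
  fcSplitY (A.filter (fun x => ¬(x = "(" ∨ x = ")" ∨ x = "O")))

-- ===== PRECONDITION & SPEC =====
def Spec_formaClausal (A : List String) (out : List (List String)) : Prop := out = formaClausal_alt A
instance (A : List String) (out : List (List String)) : Decidable (Spec_formaClausal A out) := by unfold Spec_formaClausal; infer_instance

-- ===== CLAIM (what is proved, stated in full; the proofs are below) =====
def Claim_equal_formaClausal : Prop := ∀ (A : List String), Dom_formaClausal A → Spec_formaClausal A (formaClausal A)

-- ===== LEMMAS AND PROOFS =====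

theorem fcSplitY_nil_of_not_mem (l : List String) (h : "Y" ∉ l) : fcSplitY l = [] := by
  rw [fcSplitY]; simp [h]

theorem fcSplitY_cons (pref rest : List String) (h : "Y" ∉ pref) :
    fcSplitY (pref ++ "Y" :: rest) = pref :: fcSplitY rest := by
  rw [fcSplitY]
  have hmem : "Y" ∈ pref ++ "Y" :: rest := by simp
  have hidx : (pref ++ "Y" :: rest).idxOf "Y" = pref.length := by
    rw [List.idxOf_append_of_notMem h]; simp [List.idxOf_cons_self]
  simp only [hmem, dif_pos, hidx]
  have ht : (pref ++ "Y" :: rest).take pref.length = pref := by simp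
  have hd : (pref ++ "Y" :: rest).drop (pref.length + 1) = rest := by simp
  rw [ht, hd]

theorem fcLoopA_eq (L : List String) (out : List (List String)) (aux : List String)
    (haux : "Y" ∉ aux) :
    fcLoopA L out aux = out ++ fcSplitY (aux ++ L.filter (fun x => ¬(x = "(" ∨ x = ")" ∨ x = "O"))) := by
  induction L generalizing out aux with
  | nil =>
    simp [fcLoopA, fcSplitY_nil_of_not_mem aux haux]
  | cons i rest ih =>
    by_cases hY : i = "Y"
    · subst hY
      simp only [fcLoopA, if_pos]
      rw [ih (out ++ [aux]) [] (by simp)]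
      have hf : ("Y" :: rest).filter (fun x => ¬(x = "(" ∨ x = ")" ∨ x = "O")) =
          "Y" :: rest.filter (fun x => ¬(x = "(" ∨ x = ")" ∨ x = "O")) := by
        simp
      rw [hf, fcSplitY_cons aux _ haux]
      simp
    · by_cases hk : i ≠ "(" ∧ i ≠ ")" ∧ i ≠ "O"
      · simp only [fcLoopA, if_neg hY, if_pos hk]
        rw [ih out (aux ++ [i]) (by simp [haux]; exact fun h => hY h.symm)]
        have hf : (i :: rest).filter (fun x => ¬(x = "(" ∨ x = ")" ∨ x = "O")) =
            i :: rest.filter (fun x => ¬(x = "(" ∨ x = ")" ∨ x = "O")) := by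
          simp [hk.1, hk.2.1, hk.2.2]
        rw [hf]
        simp
      · simp only [fcLoopA, if_neg hY, if_neg hk]
        rw [ih out aux haux]
        have hf : (i :: rest).filter (fun x => ¬(x = "(" ∨ x = ")" ∨ x = "O")) =
            rest.filter (fun x => ¬(x = "(" ∨ x = ")" ∨ x = "O")) := by
          push Not at hk
          by_cases h1 : i = "("
          · simp [h1]
          · by_cases h2 : i = ")"
            · simp [h2]
            · simp [hk h1 h2]
        rw [hf]

-- ===== VERDICT (by name: the statement is the Claim_ definition above) =====
theorem formaClausal_spec : Claim_equal_formaClausal := by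
  intro A _
  unfold Spec_formaClausal formaClausal formaClausal_alt
  rw [fcLoopA_eq A [] [] (by simp)]
  simp
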